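-- pv_equiv track=rewrite | github.com/Jome0169/AGP_scripts | ParseMFA.py | SortListofLAST
-- ===== SOURCE A (Python) =====
-- def SortListofLAST(ListofLast):
--     """Takes in the list of last files and creates a dictionary object based on
--     the query names as the key and the lsit as val
--
--     :ListofLast: FOr
--     formatted list with each align being an entry
--     [['a', 'score=290424', 'mismap=1e-10'], ['s',
--     'PGA_scaffold1__1360_contigs__length_129104686', '56293792', '48424', '+',
--     '129104586',]].....
--
--     :returns: Dict object
--     SpoScf_01999 : [['a', 'score=290424', 'mismap=1e-10'], ['s',
--     'PGA_scaffold1__1360_contigs__length_129104686', '56293792', '48424', '+',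
--     '129104586',]].....[[[]]]
--
-- p
--
--     """
--     SortedDict = {}
--
--     for item in ListofLast:
--         scaffoldname = item[2][1]
--         if scaffoldname not in SortedDict:
--             SortedDict[scaffoldname] = [item[1:3]]
--         elif scaffoldname in SortedDict:
--             SortedDict[scaffoldname].append(item[1:3])
--
--     return SortedDict
-- ===== SOURCE B (Python) =====
-- def SortListofLAST(ListofLast):
--     """Idiomatic two-pass rewrite: collect the distinct scaffold names in
--     first-occurrence order, then build each group with one comprehension
--     scan per key (no running dict membership/append accumulation)."""
--     keys = dict.fromkeys(item[2][1] for item in ListofLast)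
--     return {k: [it[1:3] for it in ListofLast if it[2][1] == k] for k in keys}
-- ===== Notes on version B (the rewrite author's own statement) =====
-- stated objective: idiomatic
-- what changed: Replaces the single-pass dict accumulation (membership test + insert/append per item) with a two-pass group-by: dict.fromkeys collects the distinct scaffold names in first-occurrence order, then a dict comprehension builds each group by filtering the input once per key.
import Mathlib
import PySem

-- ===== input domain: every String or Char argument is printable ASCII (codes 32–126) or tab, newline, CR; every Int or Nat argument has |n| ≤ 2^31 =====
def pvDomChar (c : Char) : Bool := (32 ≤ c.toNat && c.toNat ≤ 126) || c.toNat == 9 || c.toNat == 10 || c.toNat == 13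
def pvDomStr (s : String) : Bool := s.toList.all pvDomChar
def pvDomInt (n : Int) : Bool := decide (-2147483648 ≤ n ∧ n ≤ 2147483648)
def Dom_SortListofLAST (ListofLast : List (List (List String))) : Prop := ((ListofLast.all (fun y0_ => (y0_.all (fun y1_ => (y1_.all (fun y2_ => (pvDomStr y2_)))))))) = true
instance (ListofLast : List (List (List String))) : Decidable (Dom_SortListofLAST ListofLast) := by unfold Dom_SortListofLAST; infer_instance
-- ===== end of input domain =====

-- B replaces A's one-pass dict accumulation by an idiomatic two-pass group-by
-- (distinct keys in first-occurrence order, then one filtering scan per key); not faster.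


-- ===== PORT A =====
-- scaffoldname = item[2][1]; `none` is exactly Python's IndexError (excluded by Pre_).
def pyKeyOf (item : List (List String)) : Option String :=
  (PySem.List.pyGet? item 2).bind (fun row => PySem.List.pyGet? row 1)

-- Literal port of A's loop: a dict accumulated over the list; on an item where
-- item[2][1] would raise (outside Pre_) the step is skipped.
def SortListofLAST (ListofLast : List (List (List String))) : List (String × List (List (List String))) :=
  (ListofLast.foldl (fun d item =>
      match pyKeyOf item with
      | none => d
      | some scaffoldname =>
        if d.contains scaffoldname = false then
          d.insert scaffoldname [PySem.List.slice item (some 1) (some 3)]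
        else
          d.modify scaffoldname [] (fun v => v ++ [PySem.List.slice item (some 1) (some 3)]))
    (PySem.Dict.empty : PySem.Dict String (List (List (List String))))).items

-- ===== PORT B =====
-- it[2][1] on B's side; `none` is exactly Python's IndexError (excluded by Pre_).
def altKeyOf (it : List (List String)) : Option String :=
  (PySem.List.pyGet? it 2).bind (fun row => PySem.List.pyGet? row 1)

-- Literal port of Source B: dict.fromkeys(...) = PySem.List.dedup of the key list,
-- then one filtering scan of ListofLast per key.
def SortListofLAST_alt (ListofLast : List (List (List String))) : List (String × List (List (List String))) :=
  (PySem.List.dedup (ListofLast.filterMap altKeyOf)).map (fun k =>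
    (k, (ListofLast.filter (fun it => altKeyOf it == some k)).map
          (fun it => PySem.List.slice it (some 1) (some 3))))

-- ===== PRECONDITION & SPEC =====
-- Pre_ excludes exactly the inputs where Python A raises IndexError on item[2][1].
def Pre_SortListofLAST (ListofLast : List (List (List String))) : Prop :=
  ∀ item ∈ ListofLast, 2 < item.length ∧ 1 < (item.getD 2 []).length
instance (ListofLast : List (List (List String))) : Decidable (Pre_SortListofLAST ListofLast) := by unfold Pre_SortListofLAST; infer_instance

def pvWitness_SortListofLAST : List (List (List String)) :=
  [[["a"], ["b"], ["x", "K"]], [["c"], ["d"], ["y", "K"]], [["e"], ["f"], ["z", "M"]]]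

def Spec_SortListofLAST (ListofLast : List (List (List String))) (out : List (String × List (List (List String)))) : Prop := out = SortListofLAST_alt ListofLast
instance (ListofLast : List (List (List String))) (out : List (String × List (List (List String)))) : Decidable (Spec_SortListofLAST ListofLast out) := by unfold Spec_SortListofLAST; infer_instance

-- ===== CLAIM (what is proved, stated in full; the proofs are below) =====
def Claim_equal_SortListofLAST : Prop := ∀ (ListofLast : List (List (List String))), Dom_SortListofLAST ListofLast → Pre_SortListofLAST ListofLast → Spec_SortListofLAST ListofLast (SortListofLAST ListofLast)

-- ===== LEMMAS AND PROOFS =====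

theorem altKeyOf_eq_pyKeyOf : altKeyOf = pyKeyOf := rfl

-- The (key, slice) pairs A actually stores, in order.
def pvPairs (L : List (List (List String))) : List (String × List (List String)) :=
  L.filterMap (fun it => (pyKeyOf it).map (fun k => (k, PySem.List.slice it (some 1) (some 3))))

theorem pvStep_eq (d : PySem.Dict String (List (List (List String)))) (item : List (List String)) :
    (match pyKeyOf item with
      | none => d
      | some scaffoldname =>
        if d.contains scaffoldname = false then
          d.insert scaffoldname [PySem.List.slice item (some 1) (some 3)]
        else
          d.modify scaffoldname [] (fun v => v ++ [PySem.List.slice item (some 1) (some 3)]))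
    = (match pyKeyOf item with
      | none => d
      | some k => d.modify k [] (fun v => v ++ [PySem.List.slice item (some 1) (some 3)])) := by
  cases pyKeyOf item with
  | none => rfl
  | some k =>
    simp only
    by_cases h : d.contains k = false
    · simp [h, PySem.Dict.modify, PySem.Dict.getD_of_not_contains (h := h)]
    · simp [h]

theorem pvFold_eq (L : List (List (List String))) (d : PySem.Dict String (List (List (List String)))) :
    (L.foldl (fun d item =>
      match pyKeyOf item with
      | none => d
      | some scaffoldname =>
        if d.contains scaffoldname = false then
          d.insert scaffoldname [PySem.List.slice item (some 1) (some 3)]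
        else
          d.modify scaffoldname [] (fun v => v ++ [PySem.List.slice item (some 1) (some 3)])) d)
    = (pvPairs L).foldl (fun d p => d.modify p.1 [] (fun v => v ++ [p.2])) d := by
  induction L generalizing d with
  | nil => rfl
  | cons x xs ih =>
    simp only [List.foldl_cons, pvPairs, List.filterMap_cons]
    rw [pvStep_eq]
    cases h : pyKeyOf x with
    | none => simpa [pvPairs] using ih d
    | some k => simpa [pvPairs] using ih (d.modify k [] (fun v => v ++ [PySem.List.slice x (some 1) (some 3)]))

theorem pvPairs_fst (L : List (List (List String))) :
    (pvPairs L).map (·.1) = L.filterMap pyKeyOf := by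
  induction L with
  | nil => rfl
  | cons x xs ih =>
    simp only [pvPairs, List.filterMap_cons] at *
    cases pyKeyOf x <;> simp [ih]

theorem pvPairs_group (L : List (List (List String))) (k : String) :
    ((pvPairs L).filter (fun p => p.1 == k)).map (·.2)
      = (L.filter (fun it => pyKeyOf it == some k)).map (fun it => PySem.List.slice it (some 1) (some 3)) := by
  induction L with
  | nil => rfl
  | cons x xs ih =>
    simp only [pvPairs, List.filterMap_cons, List.filter_cons] at *
    cases h : pyKeyOf x with
    | none => simpa [h] using ih
    | some k' =>
      by_cases hk : k' = k
      · subst hk; simpa [h] using congrArg (List.cons (PySem.List.slice x (some 1) (some 3))) ih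
      · simpa [h, hk] using ih

theorem SortListofLAST_eq_alt (L : List (List (List String))) :
    SortListofLAST L = SortListofLAST_alt L := by
  unfold SortListofLAST SortListofLAST_alt
  rw [altKeyOf_eq_pyKeyOf, pvFold_eq]
  rw [PySem.Dict.items_eq_map_keys _
        (PySem.Dict.nodup_keys_foldl_modify_key (pvPairs L) (·.1) []
          (fun _ p => fun v => v ++ [p.2]) PySem.Dict.empty (by simp)) []]
  rw [PySem.Dict.keys_foldl_modify_key]
  rw [pvPairs_fst]
  have hkeys : PySem.Set.update (PySem.Dict.empty : PySem.Dict String (List (List (List String)))).keys (L.filterMap pyKeyOf)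
      = PySem.List.dedup (L.filterMap pyKeyOf) := by
    simp [PySem.Dict.keys_empty, PySem.List.dedup_eq_ofList, PySem.Set.ofList, PySem.Set.update]
  rw [hkeys]
  apply List.map_congr_left
  intro k _
  rw [PySem.Dict.getD_foldl_modify_append]
  rw [PySem.Dict.getD_empty]
  rw [pvPairs_group]
  simp

-- ===== VERDICT (by name: the statement is the Claim_ definition above) =====
theorem SortListofLAST_spec : Claim_equal_SortListofLAST := by
  intro L _ _
  unfold Spec_SortListofLAST
  exact SortListofLAST_eq_alt L
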